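-- pv_equiv track=rewrite | github.com/paiml/depyler | examples/hard_text_wrap.py | max_line_length
-- ===== SOURCE A (Python) =====
-- def split_words(text: str) -> list[str]:
--     words: list[str] = []
--     cur: str = ""
--     i: int = 0
--     while i < len(text):
--         ch: str = text[i]
--         if ch == " ":
--             if len(cur) > 0:
--                 words.append(cur)
--                 cur = ""
--         else:
--             cur = cur + ch
--         i = i + 1
--     if len(cur) > 0:
--         words.append(cur)
--     return words
--
-- def word_wrap(text: str, width: int) -> list[str]:
--     words: list[str] = split_words(text)
--     lines: list[str] = []
--     current_line: str = ""
--     i: int = 0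
--     while i < len(words):
--         w: str = words[i]
--         if len(current_line) == 0:
--             current_line = w
--         elif len(current_line) + 1 + len(w) <= width:
--             current_line = current_line + " " + w
--         else:
--             lines.append(current_line)
--             current_line = w
--         i = i + 1
--     if len(current_line) > 0:
--         lines.append(current_line)
--     return lines
--
-- def max_line_length(text: str, width: int) -> int:
--     lines: list[str] = word_wrap(text, width)
--     mx: int = 0
--     i: int = 0
--     while i < len(lines):
--         ln: int = len(lines[i])
--         if ln > mx:
--             mx = ln
--         i = i + 1
--     return mx
-- ===== SOURCE B (Python) =====
-- def _place(word, line, best, width):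
--     # put a pending word of length `word` onto the current line (greedy rule)
--     if line == 0:
--         return word, best
--     if line + 1 + word <= width:
--         return line + 1 + word, best
--     return word, (line if line > best else best)
--
-- def max_line_length(text, width):
--     word = 0   # length of the word being scanned
--     line = 0   # length of the current line
--     best = 0   # longest finished line so far
--     for ch in text:
--         if ch == " ":
--             if word > 0:
--                 line, best = _place(word, line, best, width)
--                 word = 0
--         else:
--             word += 1
--     if word > 0:
--         line, best = _place(word, line, best, width)
--     return max(best, line)
-- ===== Notes on version B (the rewrite author's own statement) =====
-- stated objective: faster
-- what changed: Single pass over the characters maintaining three integer counters (pending word length, current line length, best) instead of building a word list, a line-string list and then scanning it for the maximum.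
import Mathlib
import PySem

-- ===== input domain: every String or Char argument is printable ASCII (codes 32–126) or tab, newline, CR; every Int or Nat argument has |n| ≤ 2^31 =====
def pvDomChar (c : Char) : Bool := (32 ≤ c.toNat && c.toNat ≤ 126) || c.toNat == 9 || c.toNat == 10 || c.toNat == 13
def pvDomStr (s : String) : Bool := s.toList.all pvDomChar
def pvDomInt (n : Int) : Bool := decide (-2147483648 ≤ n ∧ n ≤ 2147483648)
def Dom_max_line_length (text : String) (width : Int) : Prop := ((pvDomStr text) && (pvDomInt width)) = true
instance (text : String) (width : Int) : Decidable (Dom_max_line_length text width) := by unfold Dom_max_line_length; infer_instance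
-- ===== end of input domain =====

-- B replaces A's three passes (split into words, build line strings, scan for the max)
-- by one pass over the characters keeping three integer counters; constant extra memory.


-- ===== PORT A =====
-- split_words: while-loop over the characters, accumulating words (strings as List Char)
def splitGo : List Char → List (List Char) → List Char → List (List Char)
  | [], words, cur => if cur.length > 0 then words ++ [cur] else words
  | ch :: rest, words, cur =>
      if ch = ' ' then
        if cur.length > 0 then splitGo rest (words ++ [cur]) [] else splitGo rest words cur
      else splitGo rest words (cur ++ [ch])

def split_words (text : String) : List (List Char) := splitGo text.toList [] []

-- word_wrap: while-loop over the words, accumulating finished lines and the current line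
def wrapGo (width : Int) : List (List Char) → List (List Char) → List Char → List (List Char)
  | [], lines, cur => if cur.length > 0 then lines ++ [cur] else lines
  | w :: rest, lines, cur =>
      if cur.length = 0 then wrapGo width rest lines w
      else if (cur.length : Int) + 1 + (w.length : Int) ≤ width then
        wrapGo width rest lines (cur ++ [' '] ++ w)
      else wrapGo width rest (lines ++ [cur]) w

def word_wrap (text : String) (width : Int) : List (List Char) :=
  wrapGo width (split_words text) [] []

-- final while-loop of max_line_length: running maximum of the line lengths
def maxGo : List (List Char) → Int → Int
  | [], mx => mx
  | l :: rest, mx => if (l.length : Int) > mx then maxGo rest (l.length : Int) else maxGo rest mx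

def max_line_length (text : String) (width : Int) : Int :=
  maxGo (word_wrap text width) 0

-- ===== PORT B =====
-- _place from Source B: put a pending word of length `word` onto the current line
def place (width word line best : Int) : Int × Int :=
  if line = 0 then (word, best)
  else if line + 1 + word ≤ width then (line + 1 + word, best)
  else (word, if line > best then line else best)

-- the single for-loop of Source B over the characters, then the flush and max(best, line)
def altGo (width : Int) : List Char → Int → Int → Int → Int
  | [], word, line, best =>
      max (if word > 0 then place width word line best else (line, best)).2
          (if word > 0 then place width word line best else (line, best)).1
  | ch :: rest, word, line, best =>
      if ch = ' ' then
        if word > 0 then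
          altGo width rest 0 (place width word line best).1 (place width word line best).2
        else altGo width rest word line best
      else altGo width rest (word + 1) line best

def max_line_length_alt (text : String) (width : Int) : Int :=
  altGo width text.toList 0 0 0

-- ===== PRECONDITION & SPEC =====
def Spec_max_line_length (text : String) (width : Int) (out : Int) : Prop := out = max_line_length_alt text width
instance (text : String) (width : Int) (out : Int) : Decidable (Spec_max_line_length text width out) := by unfold Spec_max_line_length; infer_instance

-- ===== CLAIM (what is proved, stated in full; the proofs are below) =====
def Claim_equal_max_line_length : Prop := ∀ (text : String) (width : Int), Dom_max_line_length text width → Spec_max_line_length text width (max_line_length text width)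

-- ===== LEMMAS AND PROOFS =====

-- Common abstraction both programs compute: the greedy wrap over the word LENGTHS,
-- threading the current-line length and the running maximum of finished lines.
def wrapLens (width : Int) : List Int → Int → Int → Int
  | [], line, best => max best line
  | w :: ws, line, best =>
      if line = 0 then wrapLens width ws w best
      else if line + 1 + w ≤ width then wrapLens width ws (line + 1 + w) best
      else wrapLens width ws w (if line > best then line else best)

theorem flush_eq (width w line best : Int) :
    max (place width w line best).2 (place width w line best).1
      = wrapLens width [w] line best := by
  simp only [place, wrapLens]
  split_ifs <;> simp [max_comm]

theorem place_step (width w line best : Int) (ws : List Int) :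
    wrapLens width (w :: ws) line best
      = wrapLens width ws (place width w line best).1 (place width w line best).2 := by
  simp only [place, wrapLens]
  split_ifs <;> rfl

-- splitGo's word accumulator factors out
theorem splitGo_acc (cs : List Char) : ∀ (words : List (List Char)) (cur : List Char),
    splitGo cs words cur = words ++ splitGo cs [] cur := by
  induction cs with
  | nil => intro words cur; simp only [splitGo]; split <;> simp
  | cons ch rest ih =>
      intro words cur
      simp only [splitGo]
      split
      · split
        · rw [ih (words ++ [cur]) [], ih ([] ++ [cur]) []]; simp
        · exact ih words cur
      · exact ih words (cur ++ [ch])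

-- wrapGo's line accumulator factors out
theorem wrapGo_acc (width : Int) (ws : List (List Char)) :
    ∀ (lines : List (List Char)) (cur : List Char),
    wrapGo width ws lines cur = lines ++ wrapGo width ws [] cur := by
  induction ws with
  | nil => intro lines cur; simp only [wrapGo]; split <;> simp
  | cons w rest ih =>
      intro lines cur
      simp only [wrapGo]
      split
      · exact ih lines w
      · split
        · exact ih lines (cur ++ [' '] ++ w)
        · rw [ih (lines ++ [cur]) w, ih ([] ++ [cur]) w]; simp

-- A-side: wrap-then-scan equals the length-level fold
theorem A_to_lens (width : Int) (ws : List (List Char)) :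
    ∀ (cur : List Char) (mx : Int), 0 ≤ mx →
    maxGo (wrapGo width ws [] cur) mx
      = wrapLens width (ws.map fun w => (w.length : Int)) (cur.length : Int) mx := by
  induction ws with
  | nil =>
      intro cur mx hmx
      simp only [wrapGo, List.map_nil, wrapLens, List.nil_append]
      by_cases h : cur.length > 0
      · rw [if_pos h]
        simp only [maxGo]
        split <;> omega
      · rw [if_neg h]
        simp only [maxGo]
        omega
  | cons w rest ih =>
      intro cur mx hmx
      simp only [wrapGo, List.map_cons, wrapLens, List.nil_append]
      by_cases h0 : cur.length = 0
      · have h0' : (cur.length : Int) = 0 := by exact_mod_cast h0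
        rw [if_pos h0, if_pos h0']
        exact ih w mx hmx
      · have h0' : ¬ (cur.length : Int) = 0 := by exact_mod_cast h0
        rw [if_neg h0, if_neg h0']
        by_cases hfit : (cur.length : Int) + 1 + (w.length : Int) ≤ width
        · rw [if_pos hfit, if_pos hfit, ih (cur ++ [' '] ++ w) mx hmx]
          have hlen : (((cur ++ [' '] ++ w).length : Nat) : Int)
              = (cur.length : Int) + 1 + (w.length : Int) := by
            simp only [List.length_append, List.length_cons, List.length_nil]; push_cast; ring
          rw [hlen]
        · rw [if_neg hfit, if_neg hfit, wrapGo_acc width rest [cur] w,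
              List.singleton_append]
          simp only [maxGo]
          by_cases hm : (cur.length : Int) > mx
          · rw [if_pos hm, if_pos hm, ih w _ (by omega)]
          · rw [if_neg hm, if_neg hm, ih w mx hmx]

-- B-side: the char-level fold equals the length-level fold over split_words
theorem B_to_lens (width : Int) (cs : List Char) :
    ∀ (cur : List Char) (line best : Int),
    altGo width cs (cur.length : Int) line best
      = wrapLens width ((splitGo cs [] cur).map fun w => (w.length : Int)) line best := by
  induction cs with
  | nil =>
      intro cur line best
      simp only [altGo, splitGo]
      by_cases h : cur.length > 0
      · have h' : (cur.length : Int) > 0 := by exact_mod_cast h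
        rw [if_pos h, if_pos h']
        simp only [List.nil_append, List.map_cons, List.map_nil]
        exact flush_eq width (cur.length : Int) line best
      · have h' : ¬ (cur.length : Int) > 0 := by exact_mod_cast h
        rw [if_neg h, if_neg h']
        simp [wrapLens]
  | cons ch rest ih =>
      intro cur line best
      simp only [altGo, splitGo]
      by_cases hsp : ch = ' '
      · rw [if_pos hsp, if_pos hsp]
        by_cases h : cur.length > 0
        · have h' : (cur.length : Int) > 0 := by exact_mod_cast h
          rw [if_pos h, if_pos h', splitGo_acc rest ([] ++ [cur]) []]
          simp only [List.nil_append, List.map_cons, List.singleton_append]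
          rw [place_step]
          have := ih [] (place width (cur.length : Int) line best).1
                        (place width (cur.length : Int) line best).2
          simpa using this
        · have h' : ¬ (cur.length : Int) > 0 := by exact_mod_cast h
          rw [if_neg h, if_neg h']
          exact ih cur line best
      · rw [if_neg hsp, if_neg hsp]
        have hlen : (((cur ++ [ch]).length : Nat) : Int) = (cur.length : Int) + 1 := by
          simp only [List.length_append, List.length_cons, List.length_nil]; push_cast; ring
        rw [← hlen]
        exact ih (cur ++ [ch]) line best

-- ===== VERDICT (by name: the statement is the Claim_ definition above) =====
theorem max_line_length_spec : Claim_equal_max_line_length := by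
  intro text width _
  unfold Spec_max_line_length max_line_length max_line_length_alt word_wrap split_words
  rw [A_to_lens width _ [] 0 le_rfl]
  have := B_to_lens width text.toList [] 0 0
  simp only [List.length_nil, Nat.cast_zero] at this
  exact this.symm
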